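-- pv_equiv track=rewrite | github.com/enicode/Coding_Python | 3rd/메뉴리뉴얼.py | NOO
-- ===== SOURCE A (Python) =====
-- def NOO(orders,order):
--     numberOfOrder = 0
--     # 그 주문을 제외한 모든 주문들 중에
--     for otherOrder in orders:
--         # 그 주문을 포함한 주문이 있는지 확인한다.
--         for menu in order:
--             if not menu in otherOrder:
--                 break
--         else:
--             #있다면 1 증가, 자기 자신도 검사하므로 1은 반드시 넘음
--             numberOfOrder += 1
--
--     return numberOfOrder
--
-- order = ["XYZ", "XWY", "WXA"]
-- ===== SOURCE B (Python) =====
-- def NOO(orders, order):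
--     result = set(range(len(orders)))
--     for m in order:
--         result &= {i for i, o in enumerate(orders) if m in o}
--     return len(result)
-- ===== Notes on version B (the rewrite author's own statement) =====
-- stated objective: alternative
-- what changed: B replaces A's nested per-order/per-menu membership scan with a set-algebra decomposition: it builds, for each required menu, the set of indices of orders containing it, intersects these sets starting from the full index set, and returns the size of the intersection.
import Mathlib
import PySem

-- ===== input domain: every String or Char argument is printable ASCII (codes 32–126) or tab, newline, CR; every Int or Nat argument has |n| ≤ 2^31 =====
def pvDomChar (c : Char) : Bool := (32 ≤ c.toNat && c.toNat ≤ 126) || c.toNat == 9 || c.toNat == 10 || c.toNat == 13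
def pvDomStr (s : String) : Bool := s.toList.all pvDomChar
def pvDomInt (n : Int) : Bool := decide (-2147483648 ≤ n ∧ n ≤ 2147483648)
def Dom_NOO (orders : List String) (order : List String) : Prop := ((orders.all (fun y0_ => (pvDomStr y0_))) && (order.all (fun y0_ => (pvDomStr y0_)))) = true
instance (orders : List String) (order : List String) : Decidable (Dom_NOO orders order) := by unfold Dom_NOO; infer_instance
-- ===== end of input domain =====

-- B counts the same orders by intersecting per-menu index sets instead of A's nested membership scan
-- (alternative decomposition, same asymptotic cost).

-- ===== PORT A =====
-- inner 'for menu in order: if not menu in otherOrder: break / else:' loop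
def NOOInner (order : List String) (otherOrder : String) : Bool :=
  match order with
  | [] => true
  | menu :: rest => if !(PySem.Str.isIn menu otherOrder) then false else NOOInner rest otherOrder

def NOO (orders : List String) (order : List String) : Int :=
  orders.foldl (fun numberOfOrder otherOrder =>
    if NOOInner order otherOrder then numberOfOrder + 1 else numberOfOrder) 0

-- ===== PORT B =====
-- {i for i, o in enumerate(orders) if m in o}
def NOOIdx (orders : List String) (m : String) : PySem.Set Int :=
  PySem.Set.ofList ((PySem.List.enumerate orders 0).filterMap
    (fun p => if PySem.Str.isIn m p.2 then some p.1 else none))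

def NOO_alt (orders : List String) (order : List String) : Int :=
  let result : PySem.Set Int := PySem.Set.ofList (PySem.List.pyRange 0 (PySem.List.len orders) 1)
  let final := order.foldl (fun r m => PySem.Set.inter r (NOOIdx orders m)) result
  (PySem.Set.len final : Int)

-- ===== PRECONDITION & SPEC =====
def Spec_NOO (orders : List String) (order : List String) (out : Int) : Prop := out = NOO_alt orders order
instance (orders : List String) (order : List String) (out : Int) : Decidable (Spec_NOO orders order out) := by unfold Spec_NOO; infer_instance

-- ===== CLAIM (what is proved, stated in full; the proofs are below) =====
def Claim_equal_NOO : Prop := ∀ (orders : List String) (order : List String), Dom_NOO orders order → Spec_NOO orders order (NOO orders order)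

-- ===== LEMMAS AND PROOFS =====

-- A's inner for-else loop is an 'all'
theorem NOOInner_eq_all (order : List String) (o : String) :
    NOOInner order o = order.all (fun m => PySem.Str.isIn m o) := by
  induction order with
  | nil => rfl
  | cons m rest ih =>
    simp only [NOOInner, List.all_cons, ih]
    cases h : PySem.Str.isIn m o <;> simp

-- a fold of set intersections is a single filter over the accumulator
theorem foldl_inter_eq_filter (order : List String) (orders : List String) (s : List Int) :
    order.foldl (fun r m => PySem.Set.inter r (NOOIdx orders m)) s
      = s.filter (fun i => order.all (fun m => PySem.Set.contains (NOOIdx orders m) i)) := by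
  induction order generalizing s with
  | nil => simp
  | cons m rest ih =>
    simp only [List.foldl_cons]
    rw [show PySem.Set.inter s (NOOIdx orders m)
          = s.filter (fun i => PySem.Set.contains (NOOIdx orders m) i) from rfl, ih,
        List.filter_filter]
    apply List.filter_congr
    intro i _
    simp [List.all_cons, Bool.and_comm]

-- membership in the per-menu index set
theorem mem_NOOIdx (orders : List String) (m : String) (i : Int) :
    i ∈ NOOIdx orders m ↔ ∃ (k : Nat) (h : k < orders.length), i = (k : Int) ∧ PySem.Str.isIn m orders[k] = true := by
  unfold NOOIdx
  rw [PySem.Set.mem_ofList, List.mem_filterMap]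
  constructor
  · rintro ⟨p, hp, hfp⟩
    rw [PySem.List.mem_enumerate_iff] at hp
    obtain ⟨k, hk, rfl⟩ := hp
    by_cases h : PySem.Str.isIn m orders[k] = true
    · refine ⟨k, hk, ?_, h⟩
      rw [if_pos h, Option.some_inj] at hfp
      omega
    · rw [if_neg h] at hfp
      exact absurd hfp (by simp)
  · rintro ⟨k, hk, rfl, h⟩
    exact ⟨((k : Int), orders[k]), by
      rw [PySem.List.mem_enumerate_iff]; exact ⟨k, hk, by simp⟩, by rw [if_pos h]⟩

-- ===== VERDICT (by name: the statement is the Claim_ definition above) =====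
theorem NOO_spec : Claim_equal_NOO := by
  intro orders order _
  unfold Spec_NOO NOO NOO_alt
  dsimp only
  rw [PySem.List.foldl_if_add_one, foldl_inter_eq_filter,
      PySem.Set.ofList_eq_self_of_nodup _ (PySem.List.nodup_pyRange_one 0 (PySem.List.len orders))]
  rw [show ∀ l : List Int, PySem.Set.len l = (l.length : Int) from fun _ => rfl,
      ← List.countP_eq_length_filter, zero_add]
  congr 1
  have hmap := PySem.List.map_pyGetD_pyRange_zero orders ""
  calc orders.countP (NOOInner order)
      = ((PySem.List.pyRange 0 (PySem.List.len orders) 1).map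
          (fun j => PySem.List.pyGetD orders j "")).countP (NOOInner order) := by rw [hmap]
    _ = (PySem.List.pyRange 0 (PySem.List.len orders) 1).countP
          (fun j => NOOInner order (PySem.List.pyGetD orders j "")) := by rw [List.countP_map]; rfl
    _ = _ := by
        apply List.countP_congr
        intro j hj
        rw [PySem.List.mem_pyRange_one] at hj
        obtain ⟨k, rfl⟩ : ∃ k : Nat, j = (k : Int) := ⟨j.toNat, by omega⟩
        have hk : k < orders.length := by
          have := hj.2; simp [PySem.List.len] at this; omega
        rw [PySem.List.pyGetD_natCast, List.getD_eq_getElem orders "" hk, NOOInner_eq_all]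
        simp only [List.all_eq_true]
        constructor
        · intro h m hm
          rw [PySem.Set.contains_iff, mem_NOOIdx]
          exact ⟨k, hk, rfl, h m hm⟩
        · intro h m hm
          have := h m hm
          rw [PySem.Set.contains_iff, mem_NOOIdx] at this
          obtain ⟨k', hk', hkk, hin⟩ := this
          have : k' = k := by omega
          subst this; exact hin
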